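-- pv_equiv track=rewrite | github.com/peppy0510/OpenAISublimeText | plugins/function_handler.py | _parse_model_patch
-- ===== SOURCE A (Python) =====
-- from typing import Dict, List, Tuple
--
-- def _parse_model_patch(diff: str) -> List[Tuple[str, str]]:
--     """Parse a *very* restricted patch produced by the model.
--
--     Rules:
--         • No @@/index/Hunk headers – only raw -/+ lines.
--         • Each hunk starts with ≥1 lines beginning with '-'. These lines form
--           the *context* to locate in the file.
--         • Optional consecutive '+' lines that immediately follow the '-' block
--           make the replacement. If there are no '+', it is pure deletion.
--         • Hunks are separated by at least one non-prefixed line (blank or any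
--           other text) **or** by a change of prefix (e.g., previous hunk’s +
--           block ended and we encounter the next '-').
--     Returns
--         List of tuples: [(old_block, new_block), ...]
--     """
--
--     lines = diff.splitlines()
--     i = 0
--     hunks: List[Tuple[str, str]] = []
--
--     while i < len(lines):
--         # Locate the first '-' line which is NOT a file header ('--- a/file')
--         if lines[i].startswith('-') and not lines[i].startswith('---'):
--             old_block_lines: List[str] = []
--             new_block_lines: List[str] = []
--
--             # 1. Gather all consecutive '-' lines
--             while i < len(lines) and lines[i].startswith('-') and not lines[i].startswith('---'):
--                 old_block_lines.append(lines[i][1:])  # strip prefix, preserve indentation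
--                 i += 1
--
--             # 2. Gather all consecutive '+' lines right after the '-'-block
--             while i < len(lines) and lines[i].startswith('+') and not lines[i].startswith('+++'):
--                 new_block_lines.append(lines[i][1:])
--                 i += 1
--
--             old_hunk = '\n'.join(old_block_lines) + '\n'
--             new_hunk = ('\n'.join(new_block_lines) + '\n') if new_block_lines else ''
--
--             if not old_block_lines:
--                 raise ValueError('Hunk without context (no "-" lines) encountered')
--
--             hunks.append((old_hunk, new_hunk))
--         else:
--             i += 1
--
--     if not hunks:
--         raise ValueError('No hunks found – patch body is empty or mis-formatted')
--
--     return hunks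
-- ===== SOURCE B (Python) =====
-- from typing import List, Tuple
--
-- def _parse_model_patch(diff: str) -> List[Tuple[str, str]]:
--     """Two-phase parse: classify each line, group consecutive equal-category
--     runs, then pair every 'del' run with an immediately following 'add' run."""
--
--     def cat(line: str) -> str:
--         if line.startswith('-') and not line.startswith('---'):
--             return 'del'
--         if line.startswith('+') and not line.startswith('+++'):
--             return 'add'
--         return 'other'
--
--     lines = diff.splitlines()
--
--     # Phase 1: group consecutive lines of the same category into runs.
--     runs: List[Tuple[str, List[str]]] = []
--     i = 0
--     while i < len(lines):
--         c = cat(lines[i])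
--         j = i + 1
--         while j < len(lines) and cat(lines[j]) == c:
--             j += 1
--         runs.append((c, lines[i:j]))
--         i = j
--
--     # Phase 2: walk the runs, pairing del-runs with a directly following add-run.
--     hunks: List[Tuple[str, str]] = []
--     k = 0
--     while k < len(runs):
--         c, ls = runs[k]
--         k += 1
--         if c != 'del':
--             continue
--         old = '\n'.join(l[1:] for l in ls) + '\n'
--         new = ''
--         if k < len(runs) and runs[k][0] == 'add':
--             new = '\n'.join(l[1:] for l in runs[k][1]) + '\n'
--             k += 1
--         hunks.append((old, new))
--
--     if not hunks:
--         raise ValueError('No hunks found – patch body is empty or mis-formatted')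
--     return hunks
-- ===== Notes on version B (the rewrite author's own statement) =====
-- stated objective: alternative
-- what changed: Replaces A's single pass with nested inner collection loops by a two-phase parse: first group lines into consecutive same-category runs (del/add/other), then walk the runs pairing each del-run with an immediately following add-run.
import Mathlib
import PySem

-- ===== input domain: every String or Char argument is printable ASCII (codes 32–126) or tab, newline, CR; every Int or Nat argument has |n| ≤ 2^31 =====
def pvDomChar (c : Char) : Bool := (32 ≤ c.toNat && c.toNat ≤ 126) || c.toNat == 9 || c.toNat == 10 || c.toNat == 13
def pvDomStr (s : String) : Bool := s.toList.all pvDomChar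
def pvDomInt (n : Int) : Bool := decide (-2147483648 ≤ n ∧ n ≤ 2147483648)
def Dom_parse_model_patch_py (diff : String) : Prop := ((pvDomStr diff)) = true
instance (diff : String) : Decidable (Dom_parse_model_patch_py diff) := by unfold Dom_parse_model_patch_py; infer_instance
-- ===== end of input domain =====

-- B re-decomposes A: instead of one pass with nested inner while-loops, B first groups
-- the lines into consecutive same-category runs and then pairs del-runs with add-runs.
-- Both Pythons raise ValueError when no hunk exists; Pre_ excludes exactly those inputs.

-- shared tiny helpers (line classification and block building, used verbatim by both Pythons)
def pvIsDel (l : String) : Bool :=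
  PySem.Str.startswith l "-" && !(PySem.Str.startswith l "---")

def pvIsAdd (l : String) : Bool :=
  PySem.Str.startswith l "+" && !(PySem.Str.startswith l "+++")

-- l[1:]
def pvStrip1 (l : String) : String := PySem.Str.slice l (some 1) none

-- '\n'.join(ls) + '\n'
def pvJoinNl (ls : List String) : String := PySem.Str.join "\n" ls ++ "\n"

-- ===== PORT A =====
-- inner while loop 1: gather consecutive '-' lines (stripped), return rest
def pvA_takeDel : List String → List String × List String
  | [] => ([], [])
  | l :: rest =>
    if pvIsDel l then
      let s := pvA_takeDel rest
      (pvStrip1 l :: s.1, s.2)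
    else ([], l :: rest)

-- inner while loop 2: gather consecutive '+' lines (stripped), return rest
def pvA_takeAdd : List String → List String × List String
  | [] => ([], [])
  | l :: rest =>
    if pvIsAdd l then
      let s := pvA_takeAdd rest
      (pvStrip1 l :: s.1, s.2)
    else ([], l :: rest)

theorem pvA_takeDel_len : ∀ ls : List String, (pvA_takeDel ls).2.length ≤ ls.length := by
  intro ls
  induction ls with
  | nil => simp [pvA_takeDel]
  | cons l rest ih =>
    simp only [pvA_takeDel]
    split
    · exact Nat.le_succ_of_le ih
    · simp

theorem pvA_takeAdd_len : ∀ ls : List String, (pvA_takeAdd ls).2.length ≤ ls.length := by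
  intro ls
  induction ls with
  | nil => simp [pvA_takeAdd]
  | cons l rest ih =>
    simp only [pvA_takeAdd]
    split
    · exact Nat.le_succ_of_le ih
    · simp

-- the outer while loop of A
def pvA_loop : List String → List (String × String)
  | [] => []
  | l :: rest =>
    if pvIsDel l then
      let s1 := pvA_takeDel (l :: rest)
      let s2 := pvA_takeAdd s1.2
      (pvJoinNl s1.1, if s2.1.isEmpty then "" else pvJoinNl s2.1) :: pvA_loop s2.2
    else pvA_loop rest
termination_by ls => ls.length
decreasing_by
  · have h1 : (pvA_takeDel (l :: rest)).2.length ≤ rest.length := by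
      simp only [pvA_takeDel, if_pos (by assumption)]
      exact pvA_takeDel_len rest
    have h2 := pvA_takeAdd_len (pvA_takeDel (l :: rest)).2
    simp only [List.length_cons]
    omega
  · simp

def parse_model_patch_py (diff : String) : List (String × String) :=
  pvA_loop (PySem.Str.splitlines diff)

-- ===== PORT B =====
inductive PvCat | del | add | other
deriving DecidableEq, Repr

def pvCat (l : String) : PvCat :=
  if pvIsDel l then .del else if pvIsAdd l then .add else .other

-- phase 1: group consecutive lines of equal category into runs
def pvRuns : List String → List (PvCat × List String)
  | [] => []
  | l :: ls =>
    (pvCat l, l :: ls.takeWhile (fun x => pvCat x == pvCat l)) ::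
      pvRuns (ls.dropWhile (fun x => pvCat x == pvCat l))
termination_by ls => ls.length
decreasing_by
  have := List.length_dropWhile_le (fun x => pvCat x == pvCat l) ls
  simp only [List.length_cons]
  omega

-- phase 2: walk the runs, pairing each del-run with a directly following add-run
def pvWalk : List (PvCat × List String) → List (String × String)
  | [] => []
  | (PvCat.del, ls) :: (PvCat.add, ms) :: rest' =>
    (pvJoinNl (ls.map pvStrip1), pvJoinNl (ms.map pvStrip1)) :: pvWalk rest'
  | (PvCat.del, ls) :: rest => (pvJoinNl (ls.map pvStrip1), "") :: pvWalk rest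
  | _ :: rest => pvWalk rest

def parse_model_patch_py_alt (diff : String) : List (String × String) :=
  pvWalk (pvRuns (PySem.Str.splitlines diff))

-- ===== PRECONDITION & SPEC =====
-- Pre_ excludes exactly the inputs on which A raises ValueError ('No hunks found'):
-- diffs whose splitlines contain no '-' line other than '---' headers.  (B raises there too.)
def Pre_parse_model_patch_py (diff : String) : Prop :=
  (PySem.Str.splitlines diff).any pvIsDel = true
instance (diff : String) : Decidable (Pre_parse_model_patch_py diff) := by
  unfold Pre_parse_model_patch_py; infer_instance

def pvWitness_parse_model_patch_py : String := "-old line\n+new line"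

def Spec_parse_model_patch_py (diff : String) (out : List (String × String)) : Prop :=
  out = parse_model_patch_py_alt diff
instance (diff : String) (out : List (String × String)) :
    Decidable (Spec_parse_model_patch_py diff out) := by
  unfold Spec_parse_model_patch_py; infer_instance

-- ===== CLAIM (what is proved, stated in full; the proofs are below) =====
def Claim_equal_parse_model_patch_py : Prop :=
  ∀ (diff : String), Dom_parse_model_patch_py diff → Pre_parse_model_patch_py diff →
    Spec_parse_model_patch_py diff (parse_model_patch_py diff)

-- ===== LEMMAS AND PROOFS =====
theorem pvA_takeDel_eq (xs : List String) :
    pvA_takeDel xs = ((xs.takeWhile pvIsDel).map pvStrip1, xs.dropWhile pvIsDel) := by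
  induction xs with
  | nil => simp [pvA_takeDel]
  | cons l rest ih =>
    simp only [pvA_takeDel, List.takeWhile, List.dropWhile]
    by_cases h : pvIsDel l
    · simp [h, ih]
    · simp [h]

theorem pvA_takeAdd_eq (xs : List String) :
    pvA_takeAdd xs = ((xs.takeWhile pvIsAdd).map pvStrip1, xs.dropWhile pvIsAdd) := by
  induction xs with
  | nil => simp [pvA_takeAdd]
  | cons l rest ih =>
    simp only [pvA_takeAdd, List.takeWhile, List.dropWhile]
    by_cases h : pvIsAdd l
    · simp [h, ih]
    · simp [h]

-- skipping a block of non-'-' lines one at a time is the same as dropping it wholesale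
theorem pvA_loop_skip (t r : List String) (ht : ∀ x ∈ t, pvIsDel x = false) :
    pvA_loop (t ++ r) = pvA_loop r := by
  induction t with
  | nil => rfl
  | cons x t ih =>
    have hx : pvIsDel x = false := ht x (by simp)
    rw [List.cons_append, pvA_loop]
    simp only [hx, Bool.false_eq_true, if_false]
    exact ih (fun y hy => ht y (by simp [hy]))

-- a line cannot start with both '-' and '+'
theorem pvNotBoth (x : String) (h : pvIsDel x = true) : pvIsAdd x = false := by
  unfold pvIsDel at h
  unfold pvIsAdd
  rcases Bool.and_eq_true .. |>.mp h with ⟨h1, _⟩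
  by_contra hadd
  simp only [Bool.not_eq_false, Bool.and_eq_true] at hadd
  obtain ⟨h2, _⟩ := hadd
  simp only [PySem.Str.startswith_eq] at h1 h2
  rw [PySem.Chars.startswith_iff] at h1 h2
  obtain ⟨t1, e1⟩ := h1
  obtain ⟨t2, e2⟩ := h2
  rw [← e1] at e2
  simp at e2

theorem pvCat_del_iff (x : String) : (pvCat x == PvCat.del) = pvIsDel x := by
  unfold pvCat
  by_cases h : pvIsDel x
  · simp [h]
  · simp only [h, Bool.false_eq_true, if_false]
    split <;> simp

theorem pvCat_add_iff (x : String) : (pvCat x == PvCat.add) = pvIsAdd x := by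
  unfold pvCat
  by_cases h : pvIsDel x
  · simp [h, pvNotBoth x h]
  · simp only [h, Bool.false_eq_true, if_false]
    by_cases h2 : pvIsAdd x <;> simp [h2]

theorem pv_takeWhile_congr {p q : String → Bool} (l : List String)
    (h : ∀ x, p x = q x) : l.takeWhile p = l.takeWhile q := by
  induction l with
  | nil => rfl
  | cons a l ih => simp only [List.takeWhile, h a, ih]

theorem pv_dropWhile_congr {p q : String → Bool} (l : List String)
    (h : ∀ x, p x = q x) : l.dropWhile p = l.dropWhile q := by
  induction l with
  | nil => rfl
  | cons a l ih => simp only [List.dropWhile, h a, ih]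

theorem pv_dropWhile_head {p : String → Bool} :
    ∀ (l : List String) {a : String} {t : List String},
      l.dropWhile p = a :: t → p a = false := by
  intro l
  induction l with
  | nil => intro a t h; simp [List.dropWhile] at h
  | cons x xs ih =>
    intro a t h
    by_cases hx : p x
    · rw [List.dropWhile_cons_of_pos hx] at h; exact ih h
    · rw [List.dropWhile_cons_of_neg (by simp [hx])] at h
      obtain ⟨rfl, -⟩ := List.cons.inj h
      simpa using hx

-- main equivalence of the two traversals, by strong induction on length
theorem pv_main : ∀ n (ls : List String), ls.length ≤ n →
    pvA_loop ls = pvWalk (pvRuns ls) := by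
  intro n
  induction n with
  | zero =>
    intro ls h
    have : ls = [] := List.eq_nil_of_length_eq_zero (Nat.le_zero.mp h)
    subst this
    simp [pvA_loop, pvRuns, pvWalk]
  | succ n ih =>
    intro ls h
    match ls with
    | [] => simp [pvA_loop, pvRuns, pvWalk]
    | l :: rest =>
      have hrest : rest.length ≤ n := by simpa using h
      rw [pvRuns]
      by_cases hd : pvIsDel l
      · -- head of a del-run
        have hcat : pvCat l = PvCat.del := by unfold pvCat; simp [hd]
        have htw : rest.takeWhile (fun x => pvCat x == PvCat.del)
            = rest.takeWhile pvIsDel := pv_takeWhile_congr rest pvCat_del_iff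
        have hdw : rest.dropWhile (fun x => pvCat x == PvCat.del)
            = rest.dropWhile pvIsDel := pv_dropWhile_congr rest pvCat_del_iff
        rw [pvA_loop]
        simp only [hd, if_true, hcat, htw, hdw, pvA_takeDel_eq,
          List.takeWhile_cons_of_pos hd, List.dropWhile_cons_of_pos hd,
          pvA_takeAdd_eq]
        have hrlen := List.length_dropWhile_le pvIsDel rest
        cases hD : rest.dropWhile pvIsDel with
        | nil => simp [pvWalk, pvRuns, pvA_loop]
        | cons m ms =>
          have hmlen : ms.length + 1 ≤ rest.length := by
            have := hrlen; rw [hD] at this; simpa using this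
          have hmnd : pvIsDel m = false := pv_dropWhile_head rest hD
          by_cases hma : pvIsAdd m
          · -- del-run followed directly by an add-run
            have hcm : pvCat m = PvCat.add := by
              unfold pvCat; simp [hmnd, hma]
            have htw2 : ms.takeWhile (fun x => pvCat x == PvCat.add)
                = ms.takeWhile pvIsAdd := pv_takeWhile_congr ms pvCat_add_iff
            have hdw2 : ms.dropWhile (fun x => pvCat x == PvCat.add)
                = ms.dropWhile pvIsAdd := pv_dropWhile_congr ms pvCat_add_iff
            rw [pvRuns]
            simp only [hcm, htw2, hdw2, List.takeWhile_cons_of_pos hma,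
              List.dropWhile_cons_of_pos hma, pvWalk]
            have hlen2 : (ms.dropWhile pvIsAdd).length ≤ n := by
              have := List.length_dropWhile_le pvIsAdd ms
              omega
            rw [ih _ hlen2]
            simp
          · -- del-run followed by a non-add line: empty replacement
            have hcm : pvCat m = PvCat.other := by
              unfold pvCat; simp [hmnd, hma]
            have htk : (m :: ms).takeWhile pvIsAdd = [] :=
              List.takeWhile_cons_of_neg (by simp [hma])
            have hdr : (m :: ms).dropWhile pvIsAdd = m :: ms :=
              List.dropWhile_cons_of_neg (by simp [hma])
            have hlen2 : (m :: ms).length ≤ n := by simpa using le_trans hmlen hrest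
            rw [htk, hdr, ih _ hlen2, pvRuns]
            simp only [hcm, pvWalk, List.map_nil, List.isEmpty_nil, if_true,
              List.map_cons]
      · -- head is not a '-' line: A skips line by line, B drops the whole run
        have hTdel : ∀ x ∈ l :: rest.takeWhile (fun x => pvCat x == pvCat l),
            pvIsDel x = false := by
          intro x hx
          rcases List.mem_cons.mp hx with hx | hx
          · subst hx; exact Bool.not_eq_true _ ▸ (by simpa using hd)
          · have hc := List.mem_takeWhile_imp hx
            have : pvCat x = pvCat l := by simpa using hc
            rw [← pvCat_del_iff x, this]
            unfold pvCat
            simp only [hd, Bool.false_eq_true, if_false]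
            split <;> simp
        have hsplit : rest = rest.takeWhile (fun x => pvCat x == pvCat l)
            ++ rest.dropWhile (fun x => pvCat x == pvCat l) :=
          (List.takeWhile_append_dropWhile).symm
        rw [pvA_loop]
        simp only [hd, Bool.false_eq_true, if_false]
        conv_lhs => rw [hsplit]
        rw [pvA_loop_skip _ _ (fun x hx => hTdel x (List.mem_cons_of_mem _ hx))]
        have hlen2 : (rest.dropWhile (fun x => pvCat x == pvCat l)).length ≤ n := by
          have := List.length_dropWhile_le (fun x => pvCat x == pvCat l) rest
          omega
        rw [ih _ hlen2]
        have hcne : pvCat l ≠ PvCat.del := by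
          unfold pvCat
          simp only [hd, Bool.false_eq_true, if_false]
          split <;> simp
        cases hc : pvCat l with
        | del => exact absurd hc hcne
        | add => simp only [pvWalk]
        | other => simp only [pvWalk]

-- ===== VERDICT (by name: the statement is the Claim_ definition above) =====
theorem parse_model_patch_py_spec : Claim_equal_parse_model_patch_py := by
  intro diff _ _
  unfold Spec_parse_model_patch_py parse_model_patch_py parse_model_patch_py_alt
  exact pv_main (PySem.Str.splitlines diff).length _ (Nat.le_refl _)
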